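-- pv_equiv track=rewrite | github.com/robertknight/used-css-classes | used-css-classes.py | split_class_list
-- ===== SOURCE A (Python) =====
-- def split_class_list(class_list):
--     """
--     Split a space-separated list of classes into a list of class names
--
--     Any template expressions contained in curly braces in `class_list`
--     are skipped over.
--     """
--
--     brace_depth = 0
--     classes = []
--     cls = ''
--
--     for ch in class_list + ' ':
--         if ch == '{':
--             brace_depth += 1
--         elif ch == '}':
--             brace_depth -= 1
--         elif brace_depth == 0:
--             if ch.isspace():
--                 cls = cls.strip()
--                 if cls:
--                     classes.append(cls)
--                     cls = ''
--             else:
--                 cls += ch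
--
--     return classes
-- ===== SOURCE B (Python) =====
-- def split_class_list(class_list):
--     """
--     Split a space-separated list of classes into a list of class names
--
--     Any template expressions contained in curly braces in `class_list`
--     are skipped over.
--     """
--     depth = 0
--     buf = []
--     for ch in class_list:
--         if ch == '{':
--             depth += 1
--         elif ch == '}':
--             depth -= 1
--         elif depth == 0:
--             buf.append(ch)
--     return ''.join(buf).split()
-- ===== Notes on version B (the rewrite author's own statement) =====
-- stated objective: simpler
-- what changed: B replaces A's manual word accumulator (cls buffer, strip, flush-on-space, trailing-' ' hack) with a single depth-tracking character filter followed by the builtin str.split(), which handles whitespace splitting and empty-token removal.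
-- intended difference: On strings that end inside an unbalanced brace region with an unterminated class token pending (e.g. 'a{'), A silently drops that final token (returns []), while B keeps it (returns ['a']); keeping the already-seen top-level characters is at least as valid a choice on this malformed-template corner. — e.g. on split_class_list("a{"): A returns [], B returns ["a"]
import Mathlib
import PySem

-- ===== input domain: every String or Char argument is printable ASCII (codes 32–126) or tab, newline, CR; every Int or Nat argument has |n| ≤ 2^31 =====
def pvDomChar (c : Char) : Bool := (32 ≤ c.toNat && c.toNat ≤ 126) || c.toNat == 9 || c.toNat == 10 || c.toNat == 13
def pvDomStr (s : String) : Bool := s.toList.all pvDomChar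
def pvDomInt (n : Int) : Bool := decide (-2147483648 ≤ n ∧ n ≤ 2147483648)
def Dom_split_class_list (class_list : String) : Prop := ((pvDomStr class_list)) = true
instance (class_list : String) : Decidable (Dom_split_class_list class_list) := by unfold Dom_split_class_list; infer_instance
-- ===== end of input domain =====

-- B replaces A's manual word accumulator with a depth-tracking character filter followed by a
-- whitespace split (simpler decomposition, same cost); on strings ending inside an unbalanced
-- brace region with a pending unterminated token, A drops that final token and B keeps it (see D_ below).


-- ===== PORT A =====
-- state = (brace_depth, classes, cls); one step of A's loop body
def splitA_step (st : Int × List (List Char) × List Char) (ch : Char) :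
    Int × List (List Char) × List Char :=
  let (d, classes, cls) := st
  if ch = '{' then (d + 1, classes, cls)
  else if ch = '}' then (d - 1, classes, cls)
  else if d = 0 then
    if PySem.Chars.isspace ch then
      let cls' := PySem.Chars.strip cls
      if cls'.isEmpty then (d, classes, cls') else (d, classes ++ [cls'], [])
    else (d, classes, cls ++ [ch])
  else (d, classes, cls)

def split_class_list (class_list : String) : List String :=
  let st := (class_list.toList ++ [' ']).foldl splitA_step (0, [], [])
  st.2.1.map String.ofList

-- ===== PORT B =====
-- state = (depth, buf); one step of B's loop body
def splitB_step (st : Int × List Char) (ch : Char) : Int × List Char :=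
  let (d, buf) := st
  if ch = '{' then (d + 1, buf)
  else if ch = '}' then (d - 1, buf)
  else if d = 0 then (d, buf ++ [ch])
  else (d, buf)

def split_class_list_alt (class_list : String) : List String :=
  let st := class_list.toList.foldl splitB_step (0, [])
  PySem.Str.split₀ (String.ofList st.2)

-- ===== PRECONDITION & SPEC =====
-- On strings that end inside an unbalanced brace region with an unterminated class token pending
-- (e.g. "a{"), A silently drops that final token (A "a{" = []) while B keeps it (B "a{" = ["a"]);
-- keeping the already-seen top-level characters is at least as valid a choice on this
-- malformed-template corner.  D_ is stated on the input alone: the string's brace counts are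
-- unbalanced, and its last top-level character (one whose two surrounding prefixes are both
-- brace-balanced) is not whitespace, i.e. a class token is still pending at the end.
-- is the brace count of this prefix balanced?
def pvBal (t : List Char) : Bool := t.count '{' == t.count '}'

-- the top-level characters of the string: last characters of prefixes that are
-- brace-balanced both with and without that character
def pvTopStr (cs : List Char) : List Char :=
  (cs.inits.filter fun t => pvBal t && pvBal t.dropLast).filterMap List.getLast?

def D_split_class_list (class_list : String) : Prop :=
  ¬ pvBal class_list.toList ∧
  ¬ PySem.Chars.isspace ((pvTopStr class_list.toList).getLastD ' ')
instance (class_list : String) : Decidable (D_split_class_list class_list) := by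
  unfold D_split_class_list; infer_instance


def Spec_split_class_list (class_list : String) (out : List String) : Prop :=
  ¬ D_split_class_list class_list → out = split_class_list_alt class_list
instance (class_list : String) (out : List String) : Decidable (Spec_split_class_list class_list out) := by
  unfold Spec_split_class_list; infer_instance

def pvDiffWitness_split_class_list : String := "a{"
def pvDiffWitnessOut_split_class_list : (List String) × (List String) := ([], ["a"])

-- ===== CLAIM (what is proved, stated in full; the proofs are below) =====
def Claim_unchanged_split_class_list : Prop := ∀ (class_list : String), Dom_split_class_list class_list → Spec_split_class_list class_list (split_class_list class_list)
def Claim_changed_split_class_list : Prop := Dom_split_class_list (pvDiffWitness_split_class_list) ∧ D_split_class_list (pvDiffWitness_split_class_list) ∧ split_class_list (pvDiffWitness_split_class_list) = pvDiffWitnessOut_split_class_list.1 ∧ split_class_list_alt (pvDiffWitness_split_class_list) = pvDiffWitnessOut_split_class_list.2 ∧ pvDiffWitnessOut_split_class_list.1 ≠ pvDiffWitnessOut_split_class_list.2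
def Claim_exact_split_class_list : Prop := ∀ (class_list : String), Dom_split_class_list class_list → D_split_class_list class_list → split_class_list class_list ≠ split_class_list_alt class_list

-- ===== LEMMAS AND PROOFS =====
def pvScanD (st : Int × Bool) (ch : Char) : Int × Bool :=
  let (d, p) := st
  if ch = '{' then (d + 1, p)
  else if ch = '}' then (d - 1, p)
  else if d = 0 then (d, !(PySem.Chars.isspace ch))
  else (d, p)

def filt : Int → List Char → List Char
  | _, [] => []
  | d, c :: cs =>
    if c = '{' then filt (d + 1) cs
    else if c = '}' then filt (d - 1) cs
    else if d = 0 then c :: filt d cs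
    else filt d cs

def fdep (d : Int) : List Char → Int
  | [] => d
  | c :: cs => if c = '{' then fdep (d + 1) cs else if c = '}' then fdep (d - 1) cs else fdep d cs

def wstep (st : List (List Char) × List Char) (c : Char) : List (List Char) × List Char :=
  let (classes, cls) := st
  if PySem.Chars.isspace c then
    let cls' := PySem.Chars.strip cls
    if cls'.isEmpty then (classes, cls') else (classes ++ [cls'], [])
  else (classes, cls ++ [c])

def noWs (cs : List Char) : Prop := cs.all (fun c => !PySem.Chars.isspace c) = true

theorem lemA (cs : List Char) (d : Int) (classes : List (List Char)) (cls : List Char) :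
    (cs.foldl splitA_step (d, classes, cls)).2 = (filt d cs).foldl wstep (classes, cls) := by
  induction cs generalizing d classes cls with
  | nil => rfl
  | cons c cs ih =>
    simp only [List.foldl_cons, splitA_step, filt]
    split_ifs with h1 h2 h3 h4 h5
    · exact ih _ _ _
    · exact ih _ _ _
    · rw [List.foldl_cons]
      simp only [wstep, h4, if_true, h5]
      exact ih _ _ _
    · rw [List.foldl_cons]
      simp only [wstep, h4, if_true, h5]
      exact ih _ _ _
    · rw [List.foldl_cons]
      simp only [wstep, h4]
      simp only [Bool.false_eq_true, if_false]
      exact ih _ _ _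
    · exact ih _ _ _

theorem lemB (cs : List Char) (d : Int) (buf : List Char) :
    (cs.foldl splitB_step (d, buf)).2 = buf ++ filt d cs := by
  induction cs generalizing d buf with
  | nil => simp [filt]
  | cons c cs ih =>
    simp only [List.foldl_cons, splitB_step, filt]
    split_ifs <;> simp [ih]

theorem filt_append (cs ds : List Char) (d : Int) :
    filt d (cs ++ ds) = filt d cs ++ filt (fdep d cs) ds := by
  induction cs generalizing d with
  | nil => simp [filt, fdep]
  | cons c cs ih =>
    simp only [List.cons_append, filt, fdep]
    split_ifs <;> simp [ih]

theorem scan_fst (cs : List Char) (d : Int) (p : Bool) :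
    (cs.foldl pvScanD (d, p)).1 = fdep d cs := by
  induction cs generalizing d p with
  | nil => rfl
  | cons c cs ih =>
    simp only [List.foldl_cons, pvScanD, fdep]
    split_ifs <;> exact ih _ _

theorem fdep_eq (cs : List Char) (d : Int) :
    fdep d cs = d + ((cs.count '{' : Int) - (cs.count '}' : Int)) := by
  induction cs generalizing d with
  | nil => simp [fdep]
  | cons c cs ih =>
    simp only [fdep]
    split_ifs with h1 h2
    · subst h1; rw [ih]; simp; ring
    · subst h2; rw [ih]; simp [h1]; ring
    · rw [ih]; simp [h1, h2]

theorem inits_snoc (cs : List Char) (c : Char) : (cs ++ [c]).inits = cs.inits ++ [cs ++ [c]] := by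
  rw [List.inits_append]
  simp [List.inits]

theorem topStr_snoc (cs : List Char) (c : Char) :
    pvTopStr (cs ++ [c])
      = pvTopStr cs ++ (if pvBal (cs ++ [c]) && pvBal cs then [c] else []) := by
  unfold pvTopStr
  rw [inits_snoc, List.filter_append, List.filterMap_append]
  congr 1
  rw [List.filter_singleton]
  cases hb : (pvBal (cs ++ [c]) && pvBal ((cs ++ [c]).dropLast)) with
  | false =>
    rw [List.dropLast_concat] at hb
    simp [hb]
  | true =>
    rw [List.dropLast_concat] at hb
    simp [hb]

theorem scan_eq_last (cs : List Char) :
    (cs.foldl pvScanD (0, false)).2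
      = !(PySem.Chars.isspace ((pvTopStr cs).getLastD ' ')) := by
  induction cs using List.reverseRecOn with
  | nil => decide
  | append_singleton cs c ih =>
    rw [List.foldl_append]
    rcases hst : cs.foldl pvScanD (0, false) with ⟨d, p⟩
    have hd : d = (cs.count '{' : Int) - (cs.count '}' : Int) := by
      have := scan_fst cs 0 false
      rw [hst] at this
      simp only at this
      rw [this, fdep_eq]; ring
    have hp : p = !(PySem.Chars.isspace ((pvTopStr cs).getLastD ' ')) := by
      rw [← ih, hst]
    rw [topStr_snoc]
    simp only [List.foldl_cons, List.foldl_nil, pvScanD]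
    by_cases h1 : c = '{'
    · have hnot : (pvBal (cs ++ [c]) && pvBal cs) = false := by
        unfold pvBal
        cases hb : ((cs.count '{' : Nat) == cs.count '}') with
        | false => simp
        | true =>
          have heq := beq_iff_eq.mp hb
          simp only [Bool.and_eq_false_iff, beq_eq_false_iff_ne, List.count_append, h1]
          left
          simp [heq]
      rw [hnot]
      simp [h1, hp]
    · by_cases h2 : c = '}'
      · have hnot : (pvBal (cs ++ [c]) && pvBal cs) = false := by
          unfold pvBal
          cases hb : ((cs.count '{' : Nat) == cs.count '}') with
          | false => simp
          | true =>
            have heq := beq_iff_eq.mp hb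
            simp only [Bool.and_eq_false_iff, beq_eq_false_iff_ne, List.count_append, h2]
            left
            simp [heq]
        rw [hnot]
        simp [h2, hp]
      · have hcc : pvBal (cs ++ [c]) = pvBal cs := by
          unfold pvBal
          simp [List.count_append, h1, h2]
        by_cases h3 : d = 0
        · have hb : pvBal cs = true := by
            unfold pvBal
            rw [hd] at h3
            simp only [beq_iff_eq]
            omega
          rw [hcc, hb]
          simp [h1, h2, h3]
        · have hb : pvBal cs = false := by
            unfold pvBal
            rw [hd] at h3
            simp only [beq_eq_false_iff_ne]
            omega
          rw [hcc, hb]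
          have : (false && false) = false := rfl
          rw [this]
          simp only [Bool.false_eq_true, if_false, List.append_nil]
          split_ifs
          all_goals simp [hp]

theorem D_iff (s : String) :
    D_split_class_list s
      ↔ (fdep 0 s.toList ≠ 0 ∧ (s.toList.foldl pvScanD (0, false)).2 = true) := by
  unfold D_split_class_list
  rw [scan_eq_last, fdep_eq, List.getLastD_eq_getLast?]
  unfold pvBal
  constructor
  · rintro ⟨hc, hl⟩
    rw [Bool.not_eq_true, beq_eq_false_iff_ne] at hc
    exact ⟨by omega, by simp [hl]⟩
  · rintro ⟨hc, hl⟩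
    refine ⟨by rw [Bool.not_eq_true, beq_eq_false_iff_ne]; omega, by simpa using hl⟩

theorem strip_of_noWs (cs : List Char) (h : noWs cs) : PySem.Chars.strip cs = cs := by
  unfold noWs at h
  rw [List.all_eq_true] at h
  have h1 : List.dropWhile PySem.Chars.isspace cs = cs := by
    cases cs with
    | nil => rfl
    | cons c cs =>
      have hc := h c List.mem_cons_self
      simp at hc
      simp [hc]
  have h2 : List.dropWhile PySem.Chars.isspace cs.reverse = cs.reverse := by
    cases hr : cs.reverse with
    | nil => rfl
    | cons c cs' =>
      have hm : c ∈ cs := by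
        have : c ∈ cs.reverse := by rw [hr]; exact List.mem_cons_self
        simpa using this
      have hc := h c hm
      simp at hc
      simp [hc]
  simp [PySem.Chars.strip, PySem.Chars.lstrip, PySem.Chars.rstrip, h1, h2]

theorem scan_pending (cs : List Char) (d : Int) (classes : List (List Char)) (cls : List Char)
    (h : noWs cls) :
    ((filt d cs).foldl wstep (classes, cls)).2.isEmpty
      = !(cs.foldl pvScanD (d, !cls.isEmpty)).2 := by
  induction cs generalizing d classes cls with
  | nil => simp [filt]
  | cons c cs ih =>
    simp only [filt, List.foldl_cons, pvScanD]
    split_ifs with h1 h2 h3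
    · exact ih _ _ _ h
    · exact ih _ _ _ h
    · by_cases h4 : PySem.Chars.isspace c = true
      · rw [List.foldl_cons]
        simp only [wstep, if_true, strip_of_noWs cls h, h4]
        by_cases h5 : cls.isEmpty
        · simp only [h5, ite_true]
          have := ih d classes cls h
          simpa [h4, h5] using this
        · simp only [h5]
          have := ih d (classes ++ [cls]) [] (by simp [noWs])
          simpa [h4, h5] using this
      · rw [List.foldl_cons]
        simp only [wstep, h4]
        have hnw : noWs (cls ++ [c]) := by
          unfold noWs at *
          simp [List.all_append, h, h4]
        have := ih d classes (cls ++ [c]) hnw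
        have he : (cls ++ [c]).isEmpty = false := by simp
        rw [he] at this
        simp only [Bool.false_eq_true, if_false] at this ⊢
        simpa [h4] using this
    · exact ih _ _ _ h

theorem noWs_foldl (bs : List Char) (classes : List (List Char)) (cls : List Char) (h : noWs cls) :
    noWs ((bs.foldl wstep (classes, cls)).2) := by
  induction bs generalizing classes cls with
  | nil => exact h
  | cons c bs ih =>
    rw [List.foldl_cons]
    simp only [wstep]
    by_cases h4 : PySem.Chars.isspace c = true
    · simp only [h4, if_true, strip_of_noWs cls h]
      by_cases h5 : cls.isEmpty
      · simp only [h5, ite_true]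
        exact ih _ _ h
      · simp only [h5]
        exact ih _ _ (by simp [noWs])
    · simp only [h4, Bool.false_eq_true, if_false]
      refine ih _ _ ?_
      unfold noWs at *
      simp [List.all_append, h, h4]

theorem go_acc (bs cur : List Char) (acc : List (List Char)) :
    PySem.Chars.split₀.go bs cur acc = acc.reverse ++ PySem.Chars.split₀.go bs cur [] := by
  induction bs generalizing cur acc with
  | nil =>
    simp only [PySem.Chars.split₀.go]
    by_cases h : cur.isEmpty <;> simp [h]
  | cons c bs ih =>
    simp only [PySem.Chars.split₀.go]
    by_cases h4 : PySem.Chars.isspace c = true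
    · simp only [h4, if_true]
      by_cases h5 : cur.isEmpty
      · simp only [h5, ite_true]
        rw [ih]
      · simp only [h5, Bool.false_eq_true, if_false]
        rw [ih [] (cur.reverse :: acc), ih [] [cur.reverse]]
        simp
    · simp only [h4, Bool.false_eq_true, if_false]
      exact ih _ _

theorem lemFlush (bs : List Char) (classes : List (List Char)) (cls : List Char) (h : noWs cls) :
    ((bs ++ [' ']).foldl wstep (classes, cls)).1
      = classes ++ PySem.Chars.split₀.go bs cls.reverse [] := by
  induction bs generalizing classes cls with
  | nil =>
    simp only [List.nil_append, List.foldl_cons, List.foldl_nil, wstep,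
      PySem.Chars.split₀.go, strip_of_noWs cls h]
    have : PySem.Chars.isspace ' ' = true := by decide
    simp only [this, if_true]
    by_cases h5 : cls.isEmpty
    · simp [List.isEmpty_iff.mp h5]
    · have : cls.reverse.isEmpty = false := by
        simp only [List.isEmpty_reverse]
        simpa using h5
      simp [h5, this]
  | cons c bs ih =>
    rw [List.cons_append, List.foldl_cons]
    simp only [wstep, PySem.Chars.split₀.go]
    by_cases h4 : PySem.Chars.isspace c = true
    · simp only [h4, if_true, strip_of_noWs cls h]
      by_cases h5 : cls.isEmpty
      · have hrev : cls.reverse.isEmpty = true := by simpa [List.isEmpty_reverse] using h5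
        simp only [h5, ite_true, hrev]
        have := ih classes cls h
        simpa [List.isEmpty_iff.mp h5] using this
      · have hrev : cls.reverse.isEmpty = false := by
          simp only [List.isEmpty_reverse]; simpa using h5
        simp only [h5, hrev, Bool.false_eq_true, if_false]
        rw [ih (classes ++ [cls]) [] (by simp [noWs])]
        rw [go_acc bs [] [cls.reverse.reverse]]
        simp
    · simp only [h4, Bool.false_eq_true, if_false]
      have hnw : noWs (cls ++ [c]) := by
        unfold noWs at *
        simp [List.all_append, h, h4]
      rw [ih classes (cls ++ [c]) hnw]
      simp

theorem lemNoFlush (bs : List Char) (classes : List (List Char)) (cls : List Char)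
    (h : ((bs.foldl wstep (classes, cls))).2 = []) :
    ((bs ++ [' ']).foldl wstep (classes, cls)).1 = (bs.foldl wstep (classes, cls)).1 := by
  rw [List.foldl_append]
  rcases hst : bs.foldl wstep (classes, cls) with ⟨cl', cls'⟩
  rw [hst] at h
  simp only at h
  subst h
  simp only [List.foldl_cons, List.foldl_nil, wstep]
  have hsp : PySem.Chars.isspace ' ' = true := by decide
  simp [hsp, PySem.Chars.strip, PySem.Chars.lstrip, PySem.Chars.rstrip]
theorem noWs_nil : noWs [] := by simp [noWs]

theorem alt_eq_go (s : String) :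
    split_class_list_alt s = (PySem.Chars.split₀.go (filt 0 s.toList) [] []).map String.ofList := by
  unfold split_class_list_alt
  have hB := lemB s.toList 0 []
  simp only [List.nil_append] at hB
  simp [PySem.Str.split₀, PySem.Chars.split₀, hB]

theorem a_eq_wf (s : String) :
    split_class_list s
      = ((filt 0 (s.toList ++ [' '])).foldl wstep ([], [])).1.map String.ofList := by
  show ((((s.toList ++ [' ']).foldl splitA_step (0, [], [])).2.1).map String.ofList) = _
  rw [lemA]

theorem filt_space : filt 0 [' '] = [' '] := by decide

theorem filt_space_ne (d : Int) (hd : d ≠ 0) : filt d [' '] = [] := by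
  simp [filt, hd]

theorem main_eq (s : String) (hnD : ¬ D_split_class_list s) :
    split_class_list s = split_class_list_alt s := by
  rw [a_eq_wf, alt_eq_go, filt_append]
  by_cases hd : fdep 0 s.toList = 0
  · rw [hd, filt_space, lemFlush _ _ _ noWs_nil]
    simp
  · rw [filt_space_ne _ hd, List.append_nil]
    have hp : (s.toList.foldl pvScanD (0, false)).2 = false := by
      rw [D_iff] at hnD
      simp only [not_and] at hnD
      simpa using hnD hd
    have hpend : ((filt 0 s.toList).foldl wstep ([], [])).2 = [] := by
      have h1 := scan_pending s.toList 0 [] [] noWs_nil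
      simp only [List.isEmpty_nil, Bool.not_true, hp, Bool.not_false] at h1
      simpa [List.isEmpty_iff] using h1
    rw [← lemNoFlush _ _ _ hpend, lemFlush _ _ _ noWs_nil]
    simp

theorem main_ne (s : String) (hD : D_split_class_list s) :
    split_class_list s ≠ split_class_list_alt s := by
  rw [D_iff] at hD
  obtain ⟨hd, hp⟩ := hD
  rw [a_eq_wf, alt_eq_go, filt_append, filt_space_ne _ hd, List.append_nil]
  -- pending word is nonempty
  have hpend : ((filt 0 s.toList).foldl wstep ([], [])).2 ≠ [] := by
    have h1 := scan_pending s.toList 0 [] [] noWs_nil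
    simp only [List.isEmpty_nil, Bool.not_true, hp] at h1
    intro hx
    rw [hx] at h1
    simp at h1
  -- B = A ++ [pending]
  have hgo : PySem.Chars.split₀.go (filt 0 s.toList) [] []
      = ((filt 0 s.toList).foldl wstep ([], [])).1
        ++ [((filt 0 s.toList).foldl wstep ([], [])).2] := by
    have hf := lemFlush (filt 0 s.toList) [] [] noWs_nil
    rw [List.foldl_append] at hf
    rcases hst : (filt 0 s.toList).foldl wstep ([], []) with ⟨cl', cls'⟩
    rw [hst] at hf hpend
    simp only [List.foldl_cons, List.foldl_nil, wstep] at hf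
    have hsp : PySem.Chars.isspace ' ' = true := by decide
    have hnw : noWs cls' := by
      have := noWs_foldl (filt 0 s.toList) [] [] noWs_nil
      rw [hst] at this
      exact this
    rw [strip_of_noWs _ hnw] at hf
    simp only at hpend
    have : cls'.isEmpty = false := by simpa using hpend
    simp only [hsp, if_true, this, Bool.false_eq_true, if_false] at hf
    simp only [List.reverse_nil] at hf
    simpa using hf.symm
  rw [hgo]
  intro hcontra
  have := congrArg List.length hcontra
  simp at this

-- ===== VERDICT (by name: the statement is the Claim_ definition above) =====
theorem split_class_list_spec : Claim_unchanged_split_class_list := by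
  intro s _ hnD
  exact main_eq s hnD

theorem split_class_list_changed : Claim_changed_split_class_list := by
  unfold Claim_changed_split_class_list; decide

theorem split_class_list_tight : Claim_exact_split_class_list := by
  intro s _ hD
  exact main_ne s hD
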